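-- pv_equiv track=rewrite | github.com/LuciusLan/MMPMem | eval_util.py | _clean_range_hyphens
-- ===== SOURCE A (Python) =====
-- def _clean_range_hyphens(text: str) -> str:
--     """
--     Heuristic: split range hyphens from minus signs.
--     Example: '9-10' -> '9 - 10', but '-5' remains '-5'.
--     """
--     out = []
--     for i, ch in enumerate(text):
--         if ch == "-" and i > 0 and text[i - 1].isdigit():
--             out.append(" - ")
--         else:
--             out.append(ch)
--     return "".join(out)
-- ===== SOURCE B (Python) =====
-- def _clean_range_hyphens(text: str) -> str:
--     # Two-pass: collect the boundary indices, then rebuild from slices.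
--     boundaries = [i for i in range(1, len(text))
--                   if text[i] == "-" and text[i - 1].isdigit()]
--     pieces = []
--     start = 0
--     for b in boundaries:
--         pieces.append(text[start:b])
--         pieces.append(" - ")
--         start = b + 1
--     pieces.append(text[start:])
--     return "".join(pieces)
-- ===== Notes on version B (the rewrite author's own statement) =====
-- stated objective: alternative
-- what changed: Replaced the per-character loop that appends one piece per character with a two-pass algorithm: first collect the boundary indices (hyphen preceded by a digit), then rebuild the string from the slices between boundaries joined by the spaced separator.
import Mathlib
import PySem

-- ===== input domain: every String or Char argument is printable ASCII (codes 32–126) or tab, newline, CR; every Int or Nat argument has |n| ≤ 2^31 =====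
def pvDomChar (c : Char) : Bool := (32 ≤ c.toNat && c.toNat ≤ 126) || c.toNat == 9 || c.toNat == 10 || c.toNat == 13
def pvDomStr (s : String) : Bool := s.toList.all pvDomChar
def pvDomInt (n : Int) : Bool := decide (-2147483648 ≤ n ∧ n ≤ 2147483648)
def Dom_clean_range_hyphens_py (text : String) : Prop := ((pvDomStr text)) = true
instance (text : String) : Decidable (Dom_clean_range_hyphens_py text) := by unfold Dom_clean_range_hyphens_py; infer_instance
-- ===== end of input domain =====

-- B rebuilds the result from slices between precomputed boundary indices instead of A's
-- per-character append loop (objective: alternative decomposition, same cost).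

-- ===== PORT A =====
-- out = []; for i, ch in enumerate(text): if ch == "-" and i > 0 and text[i-1].isdigit(): out.append(" - ") else: out.append(ch); return "".join(out)
def clean_range_hyphens_py (text : String) : String :=
  let cs := text.toList
  let out : List Char :=
    (PySem.List.enumerate cs 0).foldl
      (fun acc p =>
        if p.2 == '-' && decide (0 < p.1) &&
            ((PySem.List.pyGet? cs (p.1 - 1)).elim false PySem.Chars.isdigit)
        then acc ++ " - ".toList
        else acc ++ [p.2]) []
  String.ofList out

-- ===== PORT B =====
-- boundaries = [i for i in range(1, len(text)) if text[i] == "-" and text[i-1].isdigit()]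
-- pieces = []; start = 0
-- for b in boundaries: pieces.append(text[start:b]); pieces.append(" - "); start = b + 1
-- pieces.append(text[start:]); return "".join(pieces)
def clean_range_hyphens_py_alt (text : String) : String :=
  let cs := text.toList
  let boundaries : List Int :=
    (PySem.List.pyRange 1 cs.length 1).filter
      (fun i => ((PySem.List.pyGet? cs i).elim false (· == '-')) &&
                ((PySem.List.pyGet? cs (i - 1)).elim false PySem.Chars.isdigit))
  let r : List (List Char) × Int :=
    boundaries.foldl
      (fun p b => (p.1 ++ [PySem.List.slice cs (some p.2) (some b), " - ".toList], b + 1))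
      ([], 0)
  String.ofList ((r.1 ++ [PySem.List.slice cs (some r.2) none]).flatten)

-- ===== PRECONDITION & SPEC =====
def Spec_clean_range_hyphens_py (text : String) (out : String) : Prop := out = clean_range_hyphens_py_alt text
instance (text : String) (out : String) : Decidable (Spec_clean_range_hyphens_py text out) := by unfold Spec_clean_range_hyphens_py; infer_instance

-- ===== CLAIM (what is proved, stated in full; the proofs are below) =====
def Claim_equal_clean_range_hyphens_py : Prop := ∀ (text : String), Dom_clean_range_hyphens_py text → Spec_clean_range_hyphens_py text (clean_range_hyphens_py text)

-- ===== LEMMAS AND PROOFS =====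

-- the boundary condition, on Nat indices
def hyP (cs : List Char) (k : Nat) : Bool :=
  decide (0 < k) && (cs.getD k 'x' == '-') && PySem.Chars.isdigit (cs.getD (k - 1) 'x')

-- what position k contributes to the output
def hyF (cs : List Char) (k : Nat) : List Char :=
  if hyP cs k then " - ".toList else [cs.getD k 'x']

-- the slice-reconstruction, as structural recursion on the boundary list
def segs (cs : List Char) (a : Nat) : List Nat → List Char
  | [] => cs.drop a
  | b :: bs => (cs.drop a).take (b - a) ++ " - ".toList ++ segs cs (b + 1) bs

theorem segs_shift (cs : List Char) (a : Nat) (bs : List Nat)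
    (ha : a < cs.length) (hbs : ∀ b ∈ bs, a + 1 ≤ b) :
    segs cs a bs = cs.getD a 'x' :: segs cs (a + 1) bs := by
  cases bs with
  | nil =>
    simp only [segs]
    rw [List.drop_eq_getElem_cons ha]
    simp [List.getD, List.getElem?_eq_getElem ha]
  | cons b bs =>
    have hb : a + 1 ≤ b := hbs b (by simp)
    simp only [segs]
    rw [List.drop_eq_getElem_cons ha]
    have : b - a = (b - (a + 1)) + 1 := by omega
    rw [this, List.take_succ_cons]
    simp [List.getD, List.getElem?_eq_getElem ha]

theorem fold_segs (cs : List Char) (bs : List Nat) : ∀ (acc : List (List Char)) (a : Nat),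
    (((bs.map (Int.ofNat)).foldl
        (fun p b => (p.1 ++ [PySem.List.slice cs (some p.2) (some b), " - ".toList], b + 1))
        (acc, (a : Int))).1 ++
      [PySem.List.slice cs
        (some ((bs.map (Int.ofNat)).foldl
          (fun p b => (p.1 ++ [PySem.List.slice cs (some p.2) (some b), " - ".toList], b + 1))
          (acc, (a : Int))).2) none]).flatten
    = acc.flatten ++ segs cs a bs := by
  induction bs with
  | nil =>
    intro acc a
    simp [segs, PySem.List.slice_from_natCast]
  | cons b bs ih =>
    intro acc a
    simp only [List.map_cons, List.foldl_cons]
    have hcast : (Int.ofNat b) + 1 = ((b + 1 : Nat) : Int) := by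
      rw [Int.ofNat_eq_natCast]; push_cast; ring
    rw [hcast, ih]
    rw [show (Int.ofNat b) = ((b : Nat) : Int) from by rw [Int.ofNat_eq_natCast]]
    rw [PySem.List.slice_natCast]
    simp [segs, List.append_assoc]

theorem segs_filter (cs : List Char) : ∀ (m a : Nat), a + m = cs.length →
    segs cs a ((List.range' a m).filter (hyP cs)) = (List.range' a m).flatMap (hyF cs) := by
  intro m
  induction m with
  | zero =>
    intro a ha
    simp [segs, List.drop_length, show a = cs.length by omega]
  | succ m ih =>
    intro a ha
    have hcons : List.range' a (m + 1) = a :: List.range' (a + 1) m := rfl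
    rw [hcons]
    by_cases h : hyP cs a
    · rw [List.filter_cons_of_pos h, List.flatMap_cons]
      simp only [segs, Nat.sub_self, List.take_zero, List.nil_append]
      rw [ih (a + 1) (by omega), hyF, if_pos h]
    · rw [List.filter_cons_of_neg h, List.flatMap_cons]
      have hrest : ∀ b ∈ (List.range' (a + 1) m).filter (hyP cs), a + 1 ≤ b := by
        intro b hb
        have := List.mem_range'.mp (List.mem_of_mem_filter hb)
        omega
      rw [segs_shift cs a _ (by omega) hrest, ih (a + 1) (by omega), hyF, if_neg h]
      rfl

theorem condA_eq (cs : List Char) (k : Nat) (hk : k < cs.length) :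
    ((cs.getD k 'x' == '-') && decide (0 < ((k : Nat) : Int)) &&
      ((PySem.List.pyGet? cs (((k : Nat) : Int) - 1)).elim false PySem.Chars.isdigit)) = hyP cs k := by
  cases k with
  | zero => simp [hyP]
  | succ j =>
    have h1 : (((j + 1 : Nat) : Int) - 1) = ((j : Nat) : Int) := by push_cast; ring
    have hj : j < cs.length := by omega
    rw [h1, PySem.List.pyGet?_natCast, List.getElem?_eq_getElem hj]
    simp only [Option.elim]
    have h2 : cs.getD j 'x' = cs[j] := List.getD_eq_getElem cs 'x' hj
    rw [hyP, ← h2]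
    simp only [Nat.succ_sub_one, decide_eq_true (by omega : (0:Int) < ((j+1 : Nat) : Int)),
      decide_eq_true (by omega : 0 < j + 1)]
    cases cs.getD (j + 1) 'x' == '-' <;> cases PySem.Chars.isdigit (cs.getD j 'x') <;> rfl

theorem a_eq_flatMap (text : String) :
    clean_range_hyphens_py text
      = String.ofList ((List.range' 0 text.toList.length).flatMap (hyF text.toList)) := by
  unfold clean_range_hyphens_py
  set cs := text.toList with hcs
  apply congrArg String.ofList
  rw [PySem.List.foldl_congr_mem (PySem.List.enumerate cs) _
      (fun acc (p : Int × Char) => acc ++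
        (if p.2 == '-' && decide (0 < p.1) &&
            ((PySem.List.pyGet? cs (p.1 - 1)).elim false PySem.Chars.isdigit)
         then " - ".toList else [p.2]))
      [] (by intro acc x _; beta_reduce; split <;> simp_all)]
  rw [PySem.List.foldl_append_eq_flatMap]
  rw [PySem.List.enumerate_eq_map_pyRange cs 'x']
  rw [List.flatMap_map]
  rw [show PySem.List.len cs = ((cs.length : Nat) : Int) from rfl]
  rw [PySem.List.pyRange_zero_nat]
  rw [List.flatMap_map, List.range_eq_range']
  simp only [List.nil_append]
  apply List.flatMap_congr   -- pointwise
  intro k hk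
  have hk' : k < cs.length := by
    have := List.mem_range'.mp hk; omega
  show (if ((PySem.List.pyGetD cs ((k : Nat) : Int) 'x' == '-') && decide (0 < ((k : Nat) : Int)) &&
      ((PySem.List.pyGet? cs (((k : Nat) : Int) - 1)).elim false PySem.Chars.isdigit)) = true
    then " - ".toList else [PySem.List.pyGetD cs ((k : Nat) : Int) 'x']) = hyF cs k
  rw [PySem.List.pyGetD_natCast, condA_eq cs k hk', hyF]

theorem condB_eq (cs : List Char) (b : Nat) (h1 : 1 ≤ b) (h2 : b < cs.length) :
    (((PySem.List.pyGet? cs ((b : Nat) : Int)).elim false (· == '-')) &&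
     ((PySem.List.pyGet? cs (((b : Nat) : Int) - 1)).elim false PySem.Chars.isdigit)) = hyP cs b := by
  have hcast : (((b : Nat) : Int) - 1) = (((b - 1 : Nat)) : Int) := by
    push_cast [h1]; ring
  have hb1 : b - 1 < cs.length := by omega
  rw [hcast, PySem.List.pyGet?_natCast, PySem.List.pyGet?_natCast,
      List.getElem?_eq_getElem h2, List.getElem?_eq_getElem hb1]
  simp only [Option.elim, hyP, decide_eq_true (by omega : 0 < b), Bool.true_and,
    List.getD_eq_getElem cs 'x' h2, List.getD_eq_getElem cs 'x' hb1]

theorem b_eq_segs (text : String) :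
    clean_range_hyphens_py_alt text
      = String.ofList (segs text.toList 0
          ((List.range' 0 text.toList.length).filter (hyP text.toList))) := by
  unfold clean_range_hyphens_py_alt
  set cs := text.toList with hcs
  apply congrArg String.ofList
  have hb : (PySem.List.pyRange 1 ((cs.length : Nat) : Int)).filter
      (fun i => ((PySem.List.pyGet? cs i).elim false (· == '-')) &&
                ((PySem.List.pyGet? cs (i - 1)).elim false PySem.Chars.isdigit))
      = ((List.range' 1 (cs.length - 1)).filter (hyP cs)).map Int.ofNat := by
    rw [PySem.List.pyRange_one, List.filter_map,
        show (((cs.length : Nat) : Int) - 1).toNat = cs.length - 1 by omega,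
        List.range'_eq_map_range, List.filter_map, List.map_map]
    congr 1
    apply List.filter_congr
    intro k hk
    have hk' : k < cs.length - 1 := List.mem_range.mp hk
    simp only [Function.comp]
    rw [show ((1 : Int) + ((k : Nat) : Int)) = (((1 + k : Nat)) : Int) by push_cast; ring]
    exact condB_eq cs (1 + k) (by omega) (by omega)
  rw [hb, show (0 : Int) = ((0 : Nat) : Int) from rfl, fold_segs cs _ [] 0]
  rw [List.flatten_nil, List.nil_append]
  congr 1
  cases h : cs.length with
  | zero => simp
  | succ m =>
    have h0 : List.range' 0 (m + 1) = 0 :: List.range' 1 m := rfl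
    rw [show m + 1 - 1 = m from rfl, h0, List.filter_cons_of_neg (by simp [hyP])]

-- ===== VERDICT (by name: the statement is the Claim_ definition above) =====
theorem clean_range_hyphens_py_spec : Claim_equal_clean_range_hyphens_py := by
  intro text _
  unfold Spec_clean_range_hyphens_py
  rw [a_eq_flatMap, b_eq_segs, segs_filter text.toList text.toList.length 0 (by omega)]
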